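-- pv_equiv track=rewrite | github.com/chenfengjin/leetcode | 36.valid-sudoku.py | subValid
-- ===== SOURCE A (Python) =====
-- def subValid(board):
--     m = set()
--     for row in board:
--         for ele in row:
--             if ele == '.':
--                 continue
--             if ele in m:
--                 return False
--             m.add(ele)
--     return True
-- ===== SOURCE B (Python) =====
-- def subValid(board):
--     vals = sorted(e for row in board for e in row if e != '.')
--     return all(a != b for a, b in zip(vals, vals[1:]))
-- ===== Notes on version B (the rewrite author's own statement) =====
-- stated objective: alternative
-- what changed: Replaces the incremental set-membership loop with early return by a sort of the flattened non-'.' values followed by an adjacent-neighbour equality scan (duplicates are adjacent after sorting), so no hash set is used at all.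
import Mathlib
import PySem

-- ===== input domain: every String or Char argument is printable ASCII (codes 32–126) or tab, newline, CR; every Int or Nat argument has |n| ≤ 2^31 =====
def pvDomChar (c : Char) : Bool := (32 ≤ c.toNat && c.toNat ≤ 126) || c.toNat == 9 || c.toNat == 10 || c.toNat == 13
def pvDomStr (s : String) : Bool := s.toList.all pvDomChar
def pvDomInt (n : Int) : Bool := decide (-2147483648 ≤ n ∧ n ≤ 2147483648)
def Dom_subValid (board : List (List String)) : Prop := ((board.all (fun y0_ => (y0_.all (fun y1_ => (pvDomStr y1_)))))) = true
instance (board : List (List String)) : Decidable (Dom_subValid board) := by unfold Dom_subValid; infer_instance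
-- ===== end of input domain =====

-- B replaces A's incremental set-membership loop (early return on duplicate) by sorting
-- the flattened non-'.' values and scanning adjacent neighbours for equality; objective: alternative.

-- ===== PORT A =====
-- helper: inner "for ele in row" loop; returns none on the early `return False`
def subValidRow (m : PySem.Set String) : List String → Option (PySem.Set String)
  | [] => some m
  | e :: rest =>
    if e = "." then subValidRow m rest
    else if PySem.Set.contains m e then none
    else subValidRow (PySem.Set.add m e) rest

-- helper: outer "for row in board" loop
def subValidGo (m : PySem.Set String) : List (List String) → Bool
  | [] => true
  | r :: rs =>
    match subValidRow m r with
    | none => false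
    | some m' => subValidGo m' rs

def subValid (board : List (List String)) : Bool :=
  subValidGo PySem.Set.empty board

-- ===== PORT B =====
def subValid_alt (board : List (List String)) : Bool :=
  let vals := PySem.List.sorted (board.flatMap (fun row => row.filter (fun e => e ≠ "."))) (fun x => x) false
  (vals.zip (vals.drop 1)).all (fun p => p.1 ≠ p.2)

-- ===== PRECONDITION & SPEC =====
def Spec_subValid (board : List (List String)) (out : Bool) : Prop := out = subValid_alt board
instance (board : List (List String)) (out : Bool) : Decidable (Spec_subValid board out) := by unfold Spec_subValid; infer_instance

-- ===== CLAIM (what is proved, stated in full; the proofs are below) =====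
def Claim_equal_subValid : Prop := ∀ (board : List (List String)), Dom_subValid board → Spec_subValid board (subValid board)

-- ===== LEMMAS AND PROOFS =====

-- chk m l: A's membership scan, over an already-filtered single list
def chk (m : PySem.Set String) : List String → Option (PySem.Set String)
  | [] => some m
  | e :: rest => if PySem.Set.contains m e then none else chk (PySem.Set.add m e) rest

theorem row_eq_chk (row : List String) (m : PySem.Set String) :
    subValidRow m row = chk m (row.filter (fun e => e ≠ ".")) := by
  induction row generalizing m with
  | nil => rfl
  | cons e rest ih =>
    by_cases he : e = "." <;> simp [subValidRow, chk, he, ih]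

theorem chk_append (l₁ l₂ : List String) (m : PySem.Set String) :
    chk m (l₁ ++ l₂) = (chk m l₁).bind (fun m' => chk m' l₂) := by
  induction l₁ generalizing m with
  | nil => rfl
  | cons e rest ih =>
    simp only [List.cons_append, chk]
    split <;> simp [ih]

theorem go_eq_chk (rs : List (List String)) (m : PySem.Set String) :
    subValidGo m rs = (chk m (rs.flatMap (fun row => row.filter (fun e => e ≠ ".")))).isSome := by
  induction rs generalizing m with
  | nil => rfl
  | cons r rest ih =>
    simp only [subValidGo, List.flatMap_cons, chk_append, row_eq_chk]
    cases chk m (r.filter (fun e => e ≠ ".")) with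
    | none => rfl
    | some m' => simp [ih]

theorem chk_isSome (l : List String) (m : PySem.Set String) :
    (chk m l).isSome = decide (l.Nodup ∧ ∀ x ∈ l, x ∉ m) := by
  induction l generalizing m with
  | nil => simp [chk]
  | cons e rest ih =>
    by_cases h : e ∈ m
    · simp [chk, PySem.Set.contains, h]
    · rw [chk, if_neg (by simp [PySem.Set.contains, h]), ih]
      simp only [decide_eq_decide, PySem.Set.mem_add, not_or, List.nodup_cons, List.forall_mem_cons]
      constructor
      · rintro ⟨hn, hm⟩
        refine ⟨⟨fun he => (hm e he).2 rfl, hn⟩, h, fun x hx => (hm x hx).1⟩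
      · rintro ⟨⟨her, hn⟩, _, hm⟩
        exact ⟨hn, fun x hx => ⟨hm x hx, fun hxe => her (hxe ▸ hx)⟩⟩

-- on a ≤-sorted list the adjacent-neighbour scan decides Nodup (duplicates are adjacent)
theorem allAdj_eq_nodup (l : List String) (hs : l.Pairwise (· ≤ ·)) :
    ((l.zip (l.drop 1)).all (fun p => p.1 ≠ p.2)) = decide l.Nodup := by
  induction l with
  | nil => rfl
  | cons a t ih =>
    cases t with
    | nil => simp
    | cons b u =>
      rw [List.pairwise_cons] at hs
      obtain ⟨hab, ht⟩ := hs
      have hrec := ih ht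
      by_cases h : a = b
      · subst h
        simp [List.nodup_cons]
      · have ha : a ∉ b :: u := by
          intro hm
          rcases List.mem_cons.mp hm with rfl | hm
          · exact h rfl
          · have hba : b ≤ a := (List.pairwise_cons.mp ht).1 a hm
            have hab' : a ≤ b := hab b (List.mem_cons_self ..)
            exact h (le_antisymm hab' hba)
        simp only [List.drop_one, List.tail_cons, List.zip_cons_cons, List.all_cons,
          List.nodup_cons, ha, not_false_iff, true_and, decide_not]
        have : (!decide (a = b)) = true := by simp [h]
        rw [this, Bool.true_and]
        simpa using hrec

theorem subValid_spec : Claim_equal_subValid := by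
  intro board _
  unfold Spec_subValid subValid subValid_alt
  rw [go_eq_chk, chk_isSome]
  simp only [PySem.Set.empty, List.not_mem_nil, not_false_iff, implies_true, and_true]
  set vals := board.flatMap (fun row => row.filter (fun e => e ≠ ".")) with hv
  have hperm := PySem.List.sorted_perm vals (fun x => x) false
  have hpair := PySem.List.sorted_pairwise (xs := vals) (key := fun x => x)
  rw [allAdj_eq_nodup _ hpair]
  simp [hperm.nodup_iff]
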